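-- pv_equiv track=rewrite | github.com/waliens/tbc-rdruid-simulator | parse_set.py | get_bonuses
-- ===== SOURCE A (Python) =====
-- ITEM_BONUSES = {
--     27886: "idol_of_the_emerald_queen",
--     22398: "idol_of_rejuvenation",
--     25643: "harolds_rejuvenating_broach",
--     28355: "gladiators_idol_of_tenacity",
--     33076: "merciless_gladiators_idol_of_tenacity",
--     33841: "vengeful_gladiators_idol_of_tenacity",
--     35021: "brutal_gladiators_idol_of_tenacity",
--     32387: "idol_of_the_raven_goddess",
--     28568: "idol_of_the_avian_heart",
--     19288: "darkmoon_card_blue_dragon",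
--     30841: "lower_city_prayer_book",
--     32496: "memento_of_tyrande",
--     34430: "glimmering_naaru_sliver",
--     33508: "idol_of_budding_life",
--     30051: "idol_of_the_crescent_goddess"
-- }
--
-- ITEM_SETS = {
--     "t2_stormrage_raiment": {16903, 16898, 16904, 16897, 16900, 16899, 16901, 16902},
--     "t3_dreamwalker_raiment": {22492, 22494, 22493, 22490, 22489, 22491, 22488, 22495, 23064},
--     "t4_malorne_raiment": {29087, 29086, 29090, 29088, 29089},
--     "t5_nordrassil_raiment": {30216, 30217, 30219, 30220, 30221},
--     "t6_thunderheart_raiment": {31041, 31032, 31037, 31045, 31047, 34571, 34445, 34554},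
--     "primal_mooncloth": {21875, 21874, 21873},
--     "whitemend": {24264, 24261}
-- }
--
-- ITEM_SETS_BONUSES = {
--     "t2_stormrage_raiment": [5, 8],
--     "t3_dreamwalker_raiment": [4, 8],
--     "t4_malorne_raiment": [2, 4],
--     "t5_nordrassil_raiment": [2, 4],
--     "t6_thunderheart_raiment": [2, 4],
--     "primal_mooncloth": [3],
--     "whitemend": [2]
-- }
--
-- def get_bonuses(equipped):
--     bonuses = list()
--     for _id in equipped:
--         if _id in ITEM_BONUSES:
--             bonuses.append(ITEM_BONUSES[_id])
--
--     for set_name, ids in ITEM_SETS.items():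
--         inter = ids.intersection(equipped)
--         if len(inter) > 0:
--             for bonus_count in ITEM_SETS_BONUSES[set_name]:
--                 if bonus_count <= len(inter):
--                     bonuses.append(set_name + "_{}p".format(bonus_count))
--
--     return bonuses
-- ===== SOURCE B (Python) =====
-- ITEM_BONUSES = {
--     27886: "idol_of_the_emerald_queen",
--     22398: "idol_of_rejuvenation",
--     25643: "harolds_rejuvenating_broach",
--     28355: "gladiators_idol_of_tenacity",
--     33076: "merciless_gladiators_idol_of_tenacity",
--     33841: "vengeful_gladiators_idol_of_tenacity",
--     35021: "brutal_gladiators_idol_of_tenacity",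
--     32387: "idol_of_the_raven_goddess",
--     28568: "idol_of_the_avian_heart",
--     19288: "darkmoon_card_blue_dragon",
--     30841: "lower_city_prayer_book",
--     32496: "memento_of_tyrande",
--     34430: "glimmering_naaru_sliver",
--     33508: "idol_of_budding_life",
--     30051: "idol_of_the_crescent_goddess"
-- }
--
-- # Set data, flattened into parallel tables (same order as the original ITEM_SETS):
-- # per-set id lists, and per-set bonus strings precomputed with their thresholds.
-- _SET_IDS = [
--     [16903, 16898, 16904, 16897, 16900, 16899, 16901, 16902],
--     [22492, 22494, 22493, 22490, 22489, 22491, 22488, 22495, 23064],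
--     [29087, 29086, 29090, 29088, 29089],
--     [30216, 30217, 30219, 30220, 30221],
--     [31041, 31032, 31037, 31045, 31047, 34571, 34445, 34554],
--     [21875, 21874, 21873],
--     [24264, 24261],
-- ]
--
-- _SET_BONUSES = [
--     [(5, "t2_stormrage_raiment_5p"), (8, "t2_stormrage_raiment_8p")],
--     [(4, "t3_dreamwalker_raiment_4p"), (8, "t3_dreamwalker_raiment_8p")],
--     [(2, "t4_malorne_raiment_2p"), (4, "t4_malorne_raiment_4p")],
--     [(2, "t5_nordrassil_raiment_2p"), (4, "t5_nordrassil_raiment_4p")],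
--     [(2, "t6_thunderheart_raiment_2p"), (4, "t6_thunderheart_raiment_4p")],
--     [(3, "primal_mooncloth_3p")],
--     [(2, "whitemend_2p")],
-- ]
--
-- # inverted index: item id -> index of the set it belongs to (ids are disjoint across sets)
-- _ID_TO_SET = {i: k for k, ids in enumerate(_SET_IDS) for i in ids}
--
--
-- def get_bonuses(equipped):
--     out = []
--     for i in equipped:
--         name = ITEM_BONUSES.get(i)
--         if name is not None:
--             out.append(name)
--     # one pass over the distinct equipped ids: tally matched ids per set index
--     counts = [0] * len(_SET_IDS)
--     for i in dict.fromkeys(equipped):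
--         k = _ID_TO_SET.get(i)
--         if k is not None:
--             counts[k] += 1
--     return out + [s for k, pairs in enumerate(_SET_BONUSES)
--                   for t, s in pairs if t <= counts[k]]
-- ===== Notes on version B (the rewrite author's own statement) =====
-- stated objective: alternative
-- what changed: B replaces A's seven per-set set.intersection scans over equipped by a precomputed inverted id-to-set-index dict, a single tallying pass over the ordered-deduplicated equipped list into a counts array, and precomputed bonus strings emitted by threshold comparison in table order.
import Mathlib
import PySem

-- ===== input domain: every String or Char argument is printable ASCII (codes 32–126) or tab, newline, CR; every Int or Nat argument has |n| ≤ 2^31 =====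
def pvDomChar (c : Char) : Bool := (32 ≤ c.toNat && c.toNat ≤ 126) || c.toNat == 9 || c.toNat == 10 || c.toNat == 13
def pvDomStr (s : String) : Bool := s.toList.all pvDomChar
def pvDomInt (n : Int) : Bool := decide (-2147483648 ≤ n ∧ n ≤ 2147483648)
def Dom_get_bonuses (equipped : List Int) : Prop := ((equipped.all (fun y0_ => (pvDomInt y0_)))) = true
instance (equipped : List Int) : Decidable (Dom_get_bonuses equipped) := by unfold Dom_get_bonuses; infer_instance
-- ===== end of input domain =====

-- B replaces A's seven per-set set.intersection scans by an inverted id->set-index dict, one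
-- tallying pass over the ordered-deduplicated equipped list into a counts array, and
-- precomputed bonus strings (objective: alternative).

-- ===== PORT A =====
def itemBonuses : PySem.Dict Int String := PySem.Dict.mk [
  (27886, "idol_of_the_emerald_queen"),
  (22398, "idol_of_rejuvenation"),
  (25643, "harolds_rejuvenating_broach"),
  (28355, "gladiators_idol_of_tenacity"),
  (33076, "merciless_gladiators_idol_of_tenacity"),
  (33841, "vengeful_gladiators_idol_of_tenacity"),
  (35021, "brutal_gladiators_idol_of_tenacity"),
  (32387, "idol_of_the_raven_goddess"),
  (28568, "idol_of_the_avian_heart"),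
  (19288, "darkmoon_card_blue_dragon"),
  (30841, "lower_city_prayer_book"),
  (32496, "memento_of_tyrande"),
  (34430, "glimmering_naaru_sliver"),
  (33508, "idol_of_budding_life"),
  (30051, "idol_of_the_crescent_goddess")]

def itemSets : PySem.Dict String (PySem.Set Int) := PySem.Dict.mk [
  ("t2_stormrage_raiment", PySem.Set.ofList [16903, 16898, 16904, 16897, 16900, 16899, 16901, 16902]),
  ("t3_dreamwalker_raiment", PySem.Set.ofList [22492, 22494, 22493, 22490, 22489, 22491, 22488, 22495, 23064]),
  ("t4_malorne_raiment", PySem.Set.ofList [29087, 29086, 29090, 29088, 29089]),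
  ("t5_nordrassil_raiment", PySem.Set.ofList [30216, 30217, 30219, 30220, 30221]),
  ("t6_thunderheart_raiment", PySem.Set.ofList [31041, 31032, 31037, 31045, 31047, 34571, 34445, 34554]),
  ("primal_mooncloth", PySem.Set.ofList [21875, 21874, 21873]),
  ("whitemend", PySem.Set.ofList [24264, 24261])]

def itemSetsBonuses : PySem.Dict String (List Int) := PySem.Dict.mk [
  ("t2_stormrage_raiment", [5, 8]),
  ("t3_dreamwalker_raiment", [4, 8]),
  ("t4_malorne_raiment", [2, 4]),
  ("t5_nordrassil_raiment", [2, 4]),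
  ("t6_thunderheart_raiment", [2, 4]),
  ("primal_mooncloth", [3]),
  ("whitemend", [2])]

def get_bonuses (equipped : List Int) : List String :=
  let bonuses : List String := equipped.foldl (fun acc i =>
    if itemBonuses.contains i then acc ++ [itemBonuses.getD i ""] else acc) []
  itemSets.items.foldl (fun acc p =>
    let inter : PySem.Set Int := PySem.Set.inter p.2 equipped
    if 0 < PySem.Set.len inter then
      (itemSetsBonuses.getD p.1 []).foldl (fun acc2 c =>
        if c ≤ PySem.Set.len inter then
          acc2 ++ [p.1 ++ "_" ++ PySem.Int.toStr c ++ "p"]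
        else acc2) acc
    else acc) bonuses

-- ===== PORT B =====
-- the seven id lists of _SET_IDS, in order
def bIds0 : List Int := [16903, 16898, 16904, 16897, 16900, 16899, 16901, 16902]
def bIds1 : List Int := [22492, 22494, 22493, 22490, 22489, 22491, 22488, 22495, 23064]
def bIds2 : List Int := [29087, 29086, 29090, 29088, 29089]
def bIds3 : List Int := [30216, 30217, 30219, 30220, 30221]
def bIds4 : List Int := [31041, 31032, 31037, 31045, 31047, 34571, 34445, 34554]
def bIds5 : List Int := [21875, 21874, 21873]
def bIds6 : List Int := [24264, 24261]

def bSetIds : List (List Int) := [bIds0, bIds1, bIds2, bIds3, bIds4, bIds5, bIds6]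

-- _SET_BONUSES: per-set (threshold, precomputed bonus string) pairs
def bSetBonuses : List (List (Int × String)) := [
  [(5, "t2_stormrage_raiment_5p"), (8, "t2_stormrage_raiment_8p")],
  [(4, "t3_dreamwalker_raiment_4p"), (8, "t3_dreamwalker_raiment_8p")],
  [(2, "t4_malorne_raiment_2p"), (4, "t4_malorne_raiment_4p")],
  [(2, "t5_nordrassil_raiment_2p"), (4, "t5_nordrassil_raiment_4p")],
  [(2, "t6_thunderheart_raiment_2p"), (4, "t6_thunderheart_raiment_4p")],
  [(3, "primal_mooncloth_3p")],
  [(2, "whitemend_2p")]]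

-- _ID_TO_SET = {i: k for k, ids in enumerate(_SET_IDS) for i in ids}
def bIdToSet : PySem.Dict Int Int :=
  ((PySem.List.enumerate bSetIds 0).flatMap (fun p => p.2.map (fun i => (i, p.1)))).foldl
    (fun d q => d.insert q.1 q.2) PySem.Dict.empty

-- first loop: ITEM_BONUSES.get(i); if name is not None: out.append(name)
def bItemPass : List Int → List String
  | [] => []
  | i :: rest =>
      match itemBonuses.get? i with
      | some name => name :: bItemPass rest
      | none => bItemPass rest

-- tally loop: k = _ID_TO_SET.get(i); if k is not None: counts[k] += 1
-- (k is always in 0..6 and counts has length 7, so the Nat index is exact)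
def bTally : List Int → List Int → List Int
  | counts, [] => counts
  | counts, i :: rest =>
      bTally (match bIdToSet.get? i with
              | some k => counts.set k.toNat (counts.getD k.toNat 0 + 1)
              | none => counts) rest

def get_bonuses_alt (equipped : List Int) : List String :=
  let out : List String := bItemPass equipped
  -- for i in dict.fromkeys(equipped): … (ordered dedup)
  let counts : List Int := bTally (List.replicate bSetIds.length 0) (PySem.List.dedup equipped)
  out ++ (PySem.List.enumerate bSetBonuses 0).flatMap (fun p =>
    (p.2.filter (fun ts => ts.1 ≤ counts.getD p.1.toNat 0)).map (fun ts => ts.2))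

-- ===== PRECONDITION & SPEC =====
def Spec_get_bonuses (equipped : List Int) (out : List String) : Prop := out = get_bonuses_alt equipped
instance (equipped : List Int) (out : List String) : Decidable (Spec_get_bonuses equipped out) := by unfold Spec_get_bonuses; infer_instance

-- ===== CLAIM (what is proved, stated in full; the proofs are below) =====
def Claim_equal_get_bonuses : Prop := ∀ (equipped : List Int), Dom_get_bonuses equipped → Spec_get_bonuses equipped (get_bonuses equipped)

-- ===== LEMMAS AND PROOFS =====

-- A's first loop and B's first pass build the same list
lemma filter_getD_eq_filterMap (d : PySem.Dict Int String) (l : List Int) :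
    (l.filter (fun i => d.contains i)).map (fun i => d.getD i "") = l.filterMap (fun i => d.get? i) := by
  induction l with
  | nil => rfl
  | cons i t ih =>
      simp only [List.filter_cons, List.filterMap_cons]
      cases h : d.get? i with
      | none =>
          have hc : d.contains i = false := by
            rw [PySem.Dict.contains_eq_isSome_get?, h]; rfl
          simp [hc, ih]
      | some v =>
          have hc : d.contains i = true := by
            rw [PySem.Dict.contains_eq_isSome_get?, h]; rfl
          have hd : d.getD i "" = v := PySem.Dict.getD_of_get?_eq_some _ _ h
          simp [hc, hd, ih]

lemma bItemPass_eq_filterMap (l : List Int) :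
    bItemPass l = l.filterMap (fun i => itemBonuses.get? i) := by
  induction l with
  | nil => rfl
  | cons i t ih =>
      simp only [bItemPass, List.filterMap_cons]
      cases h : itemBonuses.get? i with
      | none => simp [ih]
      | some v => simp [ih]

lemma firstLoop_eq (l : List Int) :
    l.foldl (fun acc i => if itemBonuses.contains i then acc ++ [itemBonuses.getD i ""] else acc) [] =
      bItemPass l := by
  rw [PySem.List.foldl_append_if, filter_getD_eq_filterMap, bItemPass_eq_filterMap, List.nil_append]

-- what a block of inserts with one common value does to a lookup
lemma get?_pairBlock (ids : List Int) (k : Int) (d : PySem.Dict Int Int) (x : Int) :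
    ((ids.map (fun i => (i, k))).foldl (fun d2 q => d2.insert q.1 q.2) d).get? x =
      if x ∈ ids then some k else d.get? x := by
  induction ids generalizing d with
  | nil => simp
  | cons i t ih =>
      simp only [List.map_cons, List.foldl_cons, ih, PySem.Dict.get?_insert, List.mem_cons]
      by_cases hxt : x ∈ t <;> by_cases hxi : x = i <;> simp [hxt, hxi]

-- lookup in the inverted index, as a membership chain (later insert blocks win; ids are disjoint)
def idxOf (i : Int) : Option Int :=
  if i ∈ bIds6 then some 6
  else if i ∈ bIds5 then some 5
  else if i ∈ bIds4 then some 4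
  else if i ∈ bIds3 then some 3
  else if i ∈ bIds2 then some 2
  else if i ∈ bIds1 then some 1
  else if i ∈ bIds0 then some 0
  else none

lemma bIdToSet_get (i : Int) : bIdToSet.get? i = idxOf i := by
  have hflat : (PySem.List.enumerate bSetIds 0).flatMap (fun p => p.2.map (fun j => (j, p.1))) =
      bIds0.map (fun j => (j, (0:Int))) ++ (bIds1.map (fun j => (j, 1)) ++ (bIds2.map (fun j => (j, 2)) ++
        (bIds3.map (fun j => (j, 3)) ++ (bIds4.map (fun j => (j, 4)) ++ (bIds5.map (fun j => (j, 5)) ++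
          bIds6.map (fun j => (j, 6))))))) := by
    simp [bSetIds, PySem.List.enumerate_cons, PySem.List.enumerate_nil]
  unfold bIdToSet idxOf
  rw [hflat]
  simp only [List.foldl_append, get?_pairBlock, PySem.Dict.get?_empty]

lemma idx_range (i j : Int) (h : bIdToSet.get? i = some j) : 0 ≤ j ∧ j.toNat < 7 := by
  rw [bIdToSet_get] at h
  unfold idxOf at h
  split_ifs at h <;> simp_all <;> omega

-- what the tally loop leaves at a fixed index k < 7
set_option maxRecDepth 400000 in
lemma bTally_nil (counts : List Int) : bTally counts [] = counts := rfl

set_option maxRecDepth 400000 in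
lemma bTally_cons (counts : List Int) (i : Int) (rest : List Int) :
    bTally counts (i :: rest) =
      bTally (match bIdToSet.get? i with
              | some k => counts.set k.toNat (counts.getD k.toNat 0 + 1)
              | none => counts) rest := rfl

lemma tally_getD (l : List Int) (counts : List Int) (hlen : counts.length = 7)
    (k : Nat) (hk : k < 7) :
    (bTally counts l).getD k 0 =
      counts.getD k 0 + ((l.countP (fun i => bIdToSet.get? i == some (k : Int))) : Int) := by
  induction l generalizing counts with
  | nil => simp [bTally_nil]
  | cons i t ih =>
      rw [bTally_cons, List.countP_cons]
      cases h : bIdToSet.get? i with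
      | none =>
          rw [show (match (none : Option Int) with
                    | some k => counts.set k.toNat (counts.getD k.toNat 0 + 1)
                    | none => counts) = counts from rfl, ih counts hlen]
          simp
      | some j =>
          rw [show (match (some j : Option Int) with
                    | some k => counts.set k.toNat (counts.getD k.toNat 0 + 1)
                    | none => counts) = counts.set j.toNat (counts.getD j.toNat 0 + 1) from rfl]
          obtain ⟨hj0, hj7⟩ := idx_range i j h
          have hset : (counts.set j.toNat (counts.getD j.toNat 0 + 1)).length = 7 := by
            simp [hlen]
          rw [ih _ hset]
          by_cases hjk : j.toNat = k
          · have hbeq : (some j == some (k : Int)) = true := by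
              simp only [beq_iff_eq, Option.some.injEq]
              omega
            have hget : (counts.set j.toNat (counts.getD j.toNat 0 + 1)).getD k 0 =
                counts.getD k 0 + 1 := by
              subst hjk
              simp [List.getD_eq_getElem?_getD,
                List.getElem?_set_self (show j.toNat < counts.length by omega)]
            rw [hget, hbeq, if_pos rfl]
            push_cast
            ring
          · have hbeq : (some j == some (k : Int)) = false := by
              simp only [beq_eq_false_iff_ne, ne_eq, Option.some.injEq]
              omega
            have hget : (counts.set j.toNat (counts.getD j.toNat 0 + 1)).getD k 0 =
                counts.getD k 0 := by
              rw [List.getD_eq_getElem?_getD, List.getElem?_set_ne (by omega),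
                ← List.getD_eq_getElem?_getD]
            rw [hget, hbeq, if_neg (by simp)]
            simp

-- per-set predicates: matching the inverted index against a fixed set index is membership in its id list
lemma pred_iff (k : Nat) (hk : k < 7) (i : Int) :
    (bIdToSet.get? i == some (k : Int)) = decide (i ∈ bSetIds.getD k []) := by
  rw [bIdToSet_get]
  unfold idxOf
  interval_cases k <;>
    split_ifs <;>
    simp_all [bSetIds, bIds0, bIds1, bIds2, bIds3, bIds4, bIds5, bIds6] <;> omega

-- distinct-count equality: A's intersection scan vs B's count over the ordered dedup
lemma count_eq (ids : List Int) (hn : ids.Nodup) (eq : List Int) :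
    (((PySem.List.dedup eq).countP (fun i => decide (i ∈ ids))) : Int) =
      PySem.Set.len (PySem.Set.inter ids eq) := by
  unfold PySem.Set.len PySem.Set.inter
  rw [List.countP_eq_length_filter]
  have h1 : ((PySem.List.dedup eq).filter (fun i => decide (i ∈ ids))).Nodup :=
    (PySem.List.nodup_dedup eq).filter _
  have h2 : (ids.filter (fun x => PySem.Set.contains eq x)).Nodup := hn.filter _
  have hperm : ((PySem.List.dedup eq).filter (fun i => decide (i ∈ ids))).Perm
      (ids.filter (fun x => PySem.Set.contains eq x)) := by
    rw [List.perm_ext_iff_of_nodup h1 h2]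
    intro a
    simp only [List.mem_filter, PySem.List.mem_dedup, PySem.Set.contains,
      List.contains_iff_mem, decide_eq_true_eq]
    tauto
  exact_mod_cast hperm.length_eq

-- the value B's counts array holds at index k, as A's intersection size
lemma counts_val (eq : List Int) (k : Nat) (hk : k < 7) (hnodup : (bSetIds.getD k []).Nodup) :
    (bTally (List.replicate bSetIds.length 0) (PySem.List.dedup eq)).getD k 0 =
      PySem.Set.len (PySem.Set.inter (bSetIds.getD k []) eq) := by
  rw [tally_getD _ _ (by simp [bSetIds]) k hk]
  have hrep : (List.replicate bSetIds.length (0 : Int)).getD k 0 = 0 := by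
    interval_cases k <;> rfl
  have hcong : (PySem.List.dedup eq).countP (fun i => bIdToSet.get? i == some (k : Int)) =
      (PySem.List.dedup eq).countP (fun i => decide (i ∈ bSetIds.getD k [])) := by
    apply List.countP_congr
    intro a _
    rw [pred_iff k hk a]
  rw [hrep, hcong, count_eq _ hnodup]
  ring

-- emission for one set: A's guarded threshold loop appends the bonuses of the met thresholds
lemma step_block (name : String) (ths : List Int) (n : Int) (hpos : ∀ t ∈ ths, 0 < t)
    (acc : List String) :
    (if 0 < n then
        ths.foldl (fun acc2 c =>
          if c ≤ n then acc2 ++ [name ++ "_" ++ PySem.Int.toStr c ++ "p"] else acc2) acc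
      else acc) =
      acc ++ (ths.filter (fun c => c ≤ n)).map (fun c => name ++ "_" ++ PySem.Int.toStr c ++ "p") := by
  by_cases hn : 0 < n
  · simp only [hn, if_true]
    rw [PySem.List.foldl_append_ite (p := fun c => c ≤ n)]
  · have hfil : ths.filter (fun c => c ≤ n) = [] := by
      rw [List.filter_eq_nil_iff]
      intro t ht
      have := hpos t ht
      simp only [decide_eq_true_eq]
      omega
    simp [hn, hfil]

-- A's whole set loop, as a flatMap of per-set bonus blocks
lemma a_fold (items : List (String × PySem.Set Int)) (eq : List Int) (acc : List String)
    (hpos : ∀ p ∈ items, ∀ c ∈ itemSetsBonuses.getD p.1 [], 0 < c) :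
    items.foldl (fun acc p =>
      if 0 < PySem.Set.len (PySem.Set.inter p.2 eq) then
        (itemSetsBonuses.getD p.1 []).foldl (fun acc2 c =>
          if c ≤ PySem.Set.len (PySem.Set.inter p.2 eq) then
            acc2 ++ [p.1 ++ "_" ++ PySem.Int.toStr c ++ "p"] else acc2) acc
      else acc) acc =
      acc ++ items.flatMap (fun p =>
        ((itemSetsBonuses.getD p.1 []).filter
            (fun c => c ≤ PySem.Set.len (PySem.Set.inter p.2 eq))).map
          (fun c => p.1 ++ "_" ++ PySem.Int.toStr c ++ "p")) := by
  induction items generalizing acc with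
  | nil => simp
  | cons p t ih =>
      simp only [List.foldl_cons, List.flatMap_cons]
      rw [step_block _ _ _ (hpos p (by simp)), ih _ (fun q hq => hpos q (by simp [hq])),
        List.append_assoc]

-- one bonus block: thresholds rendered through format() vs the precomputed pair list
lemma pair_block (name : String) (ths : List Int) (pairs : List (Int × String)) (n : Int)
    (hth : ths = pairs.map (fun p => p.1))
    (hstr : ∀ p ∈ pairs, p.2 = name ++ "_" ++ PySem.Int.toStr p.1 ++ "p") :
    (ths.filter (fun c => c ≤ n)).map (fun c => name ++ "_" ++ PySem.Int.toStr c ++ "p") =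
      (pairs.filter (fun ts => ts.1 ≤ n)).map (fun ts => ts.2) := by
  subst hth
  rw [List.filter_map, List.map_map]
  simp only [Function.comp_def]
  apply List.map_congr_left
  intro p hp
  exact (hstr p (List.mem_filter.mp hp).1).symm

-- the literal shapes of A's two tables
lemma itemSets_items : itemSets.items =
    [("t2_stormrage_raiment", bIds0), ("t3_dreamwalker_raiment", bIds1),
     ("t4_malorne_raiment", bIds2), ("t5_nordrassil_raiment", bIds3),
     ("t6_thunderheart_raiment", bIds4), ("primal_mooncloth", bIds5), ("whitemend", bIds6)] := by
  decide

lemma getD_bonuses_T2 : itemSetsBonuses.getD "t2_stormrage_raiment" [] = [5, 8] := by decide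
lemma getD_bonuses_T3 : itemSetsBonuses.getD "t3_dreamwalker_raiment" [] = [4, 8] := by decide
lemma getD_bonuses_T4 : itemSetsBonuses.getD "t4_malorne_raiment" [] = [2, 4] := by decide
lemma getD_bonuses_T5 : itemSetsBonuses.getD "t5_nordrassil_raiment" [] = [2, 4] := by decide
lemma getD_bonuses_T6 : itemSetsBonuses.getD "t6_thunderheart_raiment" [] = [2, 4] := by decide
lemma getD_bonuses_PM : itemSetsBonuses.getD "primal_mooncloth" [] = [3] := by decide
lemma getD_bonuses_WM : itemSetsBonuses.getD "whitemend" [] = [2] := by decide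

-- ===== VERDICT (by name: the statement is the Claim_ definition above) =====
theorem get_bonuses_spec : Claim_equal_get_bonuses := by
  intro equipped _
  unfold Spec_get_bonuses get_bonuses get_bonuses_alt
  simp only [firstLoop_eq, itemSets_items]
  rw [a_fold _ equipped _ (by decide)]
  simp only [bSetBonuses, PySem.List.enumerate_cons, PySem.List.enumerate_nil,
    List.flatMap_cons, List.flatMap_nil, List.append_nil,
    getD_bonuses_T2, getD_bonuses_T3, getD_bonuses_T4, getD_bonuses_T5, getD_bonuses_T6,
    getD_bonuses_PM, getD_bonuses_WM]
  simp only [show ((0 : Int)).toNat = 0 from rfl, show ((0 : Int) + 1).toNat = 1 from rfl,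
    show ((0 : Int) + 1 + 1).toNat = 2 from rfl, show ((0 : Int) + 1 + 1 + 1).toNat = 3 from rfl,
    show ((0 : Int) + 1 + 1 + 1 + 1).toNat = 4 from rfl,
    show ((0 : Int) + 1 + 1 + 1 + 1 + 1).toNat = 5 from rfl,
    show ((0 : Int) + 1 + 1 + 1 + 1 + 1 + 1).toNat = 6 from rfl]
  simp only [counts_val equipped 0 (by omega) (by decide), counts_val equipped 1 (by omega) (by decide),
    counts_val equipped 2 (by omega) (by decide), counts_val equipped 3 (by omega) (by decide),
    counts_val equipped 4 (by omega) (by decide), counts_val equipped 5 (by omega) (by decide),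
    counts_val equipped 6 (by omega) (by decide)]
  simp only [show bSetIds.getD 0 [] = bIds0 from rfl, show bSetIds.getD 1 [] = bIds1 from rfl,
    show bSetIds.getD 2 [] = bIds2 from rfl, show bSetIds.getD 3 [] = bIds3 from rfl,
    show bSetIds.getD 4 [] = bIds4 from rfl, show bSetIds.getD 5 [] = bIds5 from rfl,
    show bSetIds.getD 6 [] = bIds6 from rfl]
  rw [pair_block "t2_stormrage_raiment" [5, 8]
        [(5, "t2_stormrage_raiment_5p"), (8, "t2_stormrage_raiment_8p")] _ (by decide) (by decide),
    pair_block "t3_dreamwalker_raiment" [4, 8]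
        [(4, "t3_dreamwalker_raiment_4p"), (8, "t3_dreamwalker_raiment_8p")] _ (by decide) (by decide),
    pair_block "t4_malorne_raiment" [2, 4]
        [(2, "t4_malorne_raiment_2p"), (4, "t4_malorne_raiment_4p")] _ (by decide) (by decide),
    pair_block "t5_nordrassil_raiment" [2, 4]
        [(2, "t5_nordrassil_raiment_2p"), (4, "t5_nordrassil_raiment_4p")] _ (by decide) (by decide),
    pair_block "t6_thunderheart_raiment" [2, 4]
        [(2, "t6_thunderheart_raiment_2p"), (4, "t6_thunderheart_raiment_4p")] _ (by decide) (by decide),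
    pair_block "primal_mooncloth" [3] [(3, "primal_mooncloth_3p")] _ (by decide) (by decide),
    pair_block "whitemend" [2] [(2, "whitemend_2p")] _ (by decide) (by decide)]
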